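-- pv_equiv track=rewrite | github.com/qumsiehluca-tech/cryptogreek | latin_to_greek.py | _assign_token_to_syllable
-- ===== SOURCE A (Python) =====
-- def _assign_token_to_syllable(tokens, syllables) -> list[int]:
--     """For each token index, which syllable does it belong to?"""
--     out = [0] * len(tokens)
--     # syllables don't carry token indices in their result form; reconstruct
--     # by replaying the split logic — easiest is to rebuild from the syllable
--     # *text* by walking tokens.
--     syl_strs = [syl["text"] for syl in syllables]
--     # Try to match each consecutive run of tokens to syllable boundaries by
--     # length of concatenated texts.
--     ti = 0
--     for si, target in enumerate(syl_strs):
--         # Accumulate tokens until we've consumed `len(target)` letters.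
--         consumed = 0
--         while ti < len(tokens) and consumed < len(target):
--             consumed += len(tokens[ti][0])
--             out[ti] = si
--             ti += 1
--     # Any leftover tokens (shouldn't happen) go to last syllable.
--     while ti < len(tokens):
--         out[ti] = len(syl_strs) - 1
--         ti += 1
--     return out
-- ===== SOURCE B (Python) =====
-- def _assign_token_to_syllable(tokens, syllables) -> list[int]:
--     """Token-outer single pass: keep a syllable pointer (skipping empty
--     syllables) and a running consumed counter instead of replaying the
--     syllable-outer/token-inner nested loops."""
--     syl_strs = [syl["text"] for syl in syllables]
--     out = []
--     si = 0
--     while si < len(syl_strs) and len(syl_strs[si]) == 0: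
--         si += 1
--     consumed = 0
--     for tok in tokens:
--         if si >= len(syl_strs):
--             out.append(len(syl_strs) - 1)
--         else:
--             out.append(si)
--             consumed += len(tok[0])
--             if consumed >= len(syl_strs[si]):
--                 si += 1
--                 while si < len(syl_strs) and len(syl_strs[si]) == 0:
--                     si += 1
--                 consumed = 0
--     return out
-- ===== Notes on version B (the rewrite author's own statement) =====
-- stated objective: alternative
-- what changed: Inverts the nested syllable-outer/token-inner loops plus a separate leftover loop into a single token-outer pass that maintains a syllable pointer (skipping empty syllables) and a running consumed counter, building the output by appending instead of index assignment into a preallocated zero list.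
import Mathlib
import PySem

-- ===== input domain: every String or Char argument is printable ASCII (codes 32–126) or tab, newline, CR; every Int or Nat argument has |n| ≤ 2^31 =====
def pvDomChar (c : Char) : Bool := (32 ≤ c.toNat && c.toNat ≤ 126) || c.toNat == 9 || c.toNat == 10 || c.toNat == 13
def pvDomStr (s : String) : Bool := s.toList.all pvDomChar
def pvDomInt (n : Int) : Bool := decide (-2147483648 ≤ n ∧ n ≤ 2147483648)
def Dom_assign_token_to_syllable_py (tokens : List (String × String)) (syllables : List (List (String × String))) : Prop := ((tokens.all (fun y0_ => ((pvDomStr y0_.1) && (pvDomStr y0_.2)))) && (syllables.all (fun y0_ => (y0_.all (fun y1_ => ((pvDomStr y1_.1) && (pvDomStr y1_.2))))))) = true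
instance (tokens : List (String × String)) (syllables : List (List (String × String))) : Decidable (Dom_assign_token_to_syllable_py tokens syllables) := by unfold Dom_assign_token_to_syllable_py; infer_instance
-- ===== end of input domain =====

-- B replaces A's syllable-outer/token-inner nested loops (plus leftover loop) by one
-- token-outer pass keeping a syllable pointer and consumed counter (objective: alternative).

-- ===== PORT A =====
-- inner `while ti < len(tokens) and consumed < len(target)` loop
def pvAWhile (tokens : List (String × String)) (tgt : Int) (si : Int) (consumed : Int)
    (ti : Nat) (out : List Int) : Nat × List Int :=
  if h : ti < tokens.length ∧ consumed < tgt then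
    pvAWhile tokens tgt si (consumed + PySem.Str.len (tokens[ti]'h.1).1) (ti + 1) (out.set ti si)
  else (ti, out)
termination_by tokens.length - ti
decreasing_by omega

-- `for si, target in enumerate(syl_strs)` with its running counter si
def pvAOuter (tokens : List (String × String)) (si ti : Nat) (out : List Int) :
    List String → Nat × List Int
  | [] => (ti, out)
  | target :: rest =>
      let st := pvAWhile tokens (PySem.Str.len target) (Int.ofNat si) 0 ti out
      pvAOuter tokens (si + 1) st.1 st.2 rest

-- trailing `while ti < len(tokens)` leftover loop
def pvALeft (v : Int) (n ti : Nat) (out : List Int) : List Int :=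
  if ti < n then pvALeft v n (ti + 1) (out.set ti v) else out
termination_by n - ti
decreasing_by omega

def assign_token_to_syllable_py (tokens : List (String × String))
    (syllables : List (List (String × String))) : List Int :=
  let out := List.replicate tokens.length (0 : Int)
  -- syl["text"]: KeyError when "text" is absent is excluded by Pre_; the `.getD ""` default is unreachable there
  let syl_strs := syllables.map (fun syl => ((PySem.Dict.ofList syl).get? "text").getD "")
  let st := pvAOuter tokens 0 0 out syl_strs
  pvALeft ((Int.ofNat syl_strs.length) - 1) tokens.length st.1 st.2

-- ===== PORT B =====
-- `while si < len(syl_strs) and len(syl_strs[si]) == 0: si += 1`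
def pvBSkip (syl_strs : List String) (si : Nat) : Nat :=
  if h : si < syl_strs.length then
    if PySem.Str.len (syl_strs[si]'h) = 0 then pvBSkip syl_strs (si + 1) else si
  else si
termination_by syl_strs.length - si
decreasing_by omega

-- `for tok in tokens` pass with state (si, consumed, out)
def pvBLoop (syl_strs : List String) : List (String × String) → Nat → Int → List Int → List Int
  | [], _, _, out => out
  | tok :: rest, si, consumed, out =>
      if h : syl_strs.length ≤ si then
        pvBLoop syl_strs rest si consumed (out ++ [(Int.ofNat syl_strs.length) - 1])
      else
        let out' := out ++ [Int.ofNat si]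
        let c := consumed + PySem.Str.len tok.1
        if PySem.Str.len (syl_strs[si]'(by omega)) ≤ c then
          pvBLoop syl_strs rest (pvBSkip syl_strs (si + 1)) 0 out'
        else
          pvBLoop syl_strs rest si c out'

def assign_token_to_syllable_py_alt (tokens : List (String × String))
    (syllables : List (List (String × String))) : List Int :=
  -- same `syl["text"]` comprehension as A; KeyError excluded by Pre_
  let syl_strs := syllables.map (fun syl => ((PySem.Dict.ofList syl).get? "text").getD "")
  pvBLoop syl_strs tokens (pvBSkip syl_strs 0) 0 []

-- ===== PRECONDITION & SPEC =====
-- Pre_ excludes exactly the inputs where `syl["text"]` raises KeyError (a syllable dict without key "text"); both A and B raise there.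
def Pre_assign_token_to_syllable_py (tokens : List (String × String)) (syllables : List (List (String × String))) : Prop :=
  ∀ syl ∈ syllables, (syl.map Prod.fst).contains "text" = true
instance (tokens : List (String × String)) (syllables : List (List (String × String))) : Decidable (Pre_assign_token_to_syllable_py tokens syllables) := by unfold Pre_assign_token_to_syllable_py; infer_instance

def pvWitness_assign_token_to_syllable_py : (List (String × String)) × (List (List (String × String))) :=
  ([("ab", "x"), ("c", "y")], [[("text", "ab")], [("text", "c")]])

def Spec_assign_token_to_syllable_py (tokens : List (String × String)) (syllables : List (List (String × String))) (out : List Int) : Prop := out = assign_token_to_syllable_py_alt tokens syllables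
instance (tokens : List (String × String)) (syllables : List (List (String × String))) (out : List Int) : Decidable (Spec_assign_token_to_syllable_py tokens syllables out) := by unfold Spec_assign_token_to_syllable_py; infer_instance

-- ===== CLAIM (what is proved, stated in full; the proofs are below) =====
def Claim_equal_assign_token_to_syllable_py : Prop := ∀ (tokens : List (String × String)) (syllables : List (List (String × String))), Dom_assign_token_to_syllable_py tokens syllables → Pre_assign_token_to_syllable_py tokens syllables → Spec_assign_token_to_syllable_py tokens syllables (assign_token_to_syllable_py tokens syllables)

-- ===== LEMMAS AND PROOFS =====

lemma pvBSkip_ge (S : List String) (k : Nat) (h : S.length ≤ k) : pvBSkip S k = k := by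
  unfold pvBSkip
  rw [dif_neg (by omega)]

lemma pvBLoop_acc (S : List String) (toks : List (String × String)) (si : Nat) (c : Int)
    (acc : List Int) : pvBLoop S toks si c acc = acc ++ pvBLoop S toks si c [] := by
  induction toks generalizing si c acc with
  | nil => simp [pvBLoop]
  | cons tok rest ih =>
      simp only [pvBLoop]
      split_ifs <;> rw [ih _ _ (acc ++ _), ih _ _ ([] ++ _)] <;> simp

lemma pvBLoop_past (S : List String) (toks : List (String × String)) (si : Nat) (c : Int)
    (h : S.length ≤ si) :
    pvBLoop S toks si c [] = List.replicate toks.length ((Int.ofNat S.length) - 1) := by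
  induction toks generalizing c with
  | nil => simp [pvBLoop]
  | cons tok rest ih =>
      simp only [pvBLoop, dif_pos h]
      rw [pvBLoop_acc, ih]
      simp [List.replicate_succ]

lemma pv_take_set (xs : List Int) (i : Nat) (v : Int) (h : i < xs.length) :
    (xs.set i v).take (i + 1) = xs.take i ++ [v] := by
  rw [List.take_add_one]
  simp [List.take_set, h]
  exact List.set_eq_of_length_le (by simp)

lemma pvALeft_spec (v : Int) (n ti : Nat) (out : List Int) (hlen : out.length = n)
    (hti : ti ≤ n) : pvALeft v n ti out = out.take ti ++ List.replicate (n - ti) v := by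
  obtain ⟨fuel, hf⟩ : ∃ f, n - ti = f := ⟨_, rfl⟩
  induction fuel generalizing ti out with
  | zero =>
      rw [pvALeft, if_neg (by omega)]
      have : ti = n := by omega
      simp [this, ← hlen, List.take_of_length_le (le_refl _)]
  | succ f ih =>
      rw [pvALeft, if_pos (by omega)]
      rw [ih (ti + 1) (out.set ti v) (by simp [hlen]) (by omega) (by omega)]
      rw [pv_take_set out ti v (by omega)]
      have h1 : n - ti = (n - (ti + 1)) + 1 := by omega
      rw [h1, List.replicate_succ]
      simp

lemma pvAWhile_len (tokens : List (String × String)) (tgt si consumed : Int)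
    (ti : Nat) (out : List Int) :
    (pvAWhile tokens tgt si consumed ti out).2.length = out.length := by
  obtain ⟨fuel, hf⟩ : ∃ f, tokens.length - ti = f := ⟨_, rfl⟩
  induction fuel generalizing consumed ti out with
  | zero => rw [pvAWhile, dif_neg (by omega)]
  | succ f ih =>
      rw [pvAWhile]
      split_ifs with h
      · rw [ih _ _ _ (by omega)]; simp
      · rfl

lemma pvAWhile_le (tokens : List (String × String)) (tgt si consumed : Int)
    (ti : Nat) (out : List Int) (h : ti ≤ tokens.length) :
    ti ≤ (pvAWhile tokens tgt si consumed ti out).1 ∧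
    (pvAWhile tokens tgt si consumed ti out).1 ≤ tokens.length := by
  obtain ⟨fuel, hf⟩ : ∃ f, tokens.length - ti = f := ⟨_, rfl⟩
  induction fuel generalizing consumed ti out with
  | zero =>
      rw [pvAWhile, dif_neg (by omega)]
      exact ⟨le_refl _, h⟩
  | succ f ih =>
      rw [pvAWhile]
      split_ifs with hg
      · have := ih (consumed + PySem.Str.len (tokens[ti]'hg.1).1) (ti + 1)
          (out.set ti si) (by omega) (by omega)
        exact ⟨by omega, this.2⟩
      · exact ⟨le_refl _, h⟩

lemma pv_inner (tokens : List (String × String)) (S : List String) (k : Nat)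
    (hk : k < S.length) (tgt : Int) (htgt : tgt = PySem.Str.len S[k]) :
    ∀ (ti : Nat) (consumed : Int) (out : List Int), out.length = tokens.length → ti ≤ tokens.length →
    consumed < tgt →
    (pvAWhile tokens tgt (Int.ofNat k) consumed ti out).2.take
        (pvAWhile tokens tgt (Int.ofNat k) consumed ti out).1 ++
      pvBLoop S (tokens.drop (pvAWhile tokens tgt (Int.ofNat k) consumed ti out).1)
        (pvBSkip S (k + 1)) 0 [] =
    out.take ti ++ pvBLoop S (tokens.drop ti) k consumed [] := by
  intro ti consumed out hlen hti hcons
  obtain ⟨fuel, hf⟩ : ∃ f, tokens.length - ti = f := ⟨_, rfl⟩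
  induction fuel generalizing ti consumed out with
  | zero =>
      have hti' : ti = tokens.length := by omega
      rw [pvAWhile, dif_neg (by omega)]
      simp [hti', pvBLoop]
  | succ f ih =>
      have hlt : ti < tokens.length := by omega
      rw [pvAWhile, dif_pos ⟨hlt, hcons⟩]
      rw [List.drop_eq_getElem_cons hlt]
      conv_rhs => simp only [pvBLoop]
      rw [dif_neg (by omega)]
      by_cases hc2 : consumed + PySem.Str.len (tokens[ti]'hlt).1 < tgt
      · rw [ih (ti + 1) _ (out.set ti (Int.ofNat k)) (by simp [hlen]) (by omega) hc2 (by omega)]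
        rw [if_neg (by rw [← htgt]; omega)]
        rw [pv_take_set out ti _ (by omega)]
        simp
        exact (pvBLoop_acc S _ _ _ [(k : Int)]).symm
      · rw [pvAWhile, dif_neg (by push_neg; intro _; omega)]
        rw [if_pos (by rw [← htgt]; omega)]
        rw [pv_take_set out ti _ (by omega)]
        simp
        exact (pvBLoop_acc S _ _ _ [(k : Int)]).symm

lemma pv_outer (tokens : List (String × String)) (S : List String) :
    ∀ k ti (out : List Int), out.length = tokens.length → ti ≤ tokens.length →
    (let st := pvAOuter tokens k ti out (S.drop k)
     pvALeft ((Int.ofNat S.length) - 1) tokens.length st.1 st.2) =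
    out.take ti ++ pvBLoop S (tokens.drop ti) (pvBSkip S k) 0 [] := by
  intro k ti out hlen hti
  obtain ⟨fuel, hf⟩ : ∃ f, S.length - k = f := ⟨_, rfl⟩
  induction fuel generalizing k ti out with
  | zero =>
      have hk : S.length ≤ k := by omega
      rw [List.drop_eq_nil_iff.mpr (by omega)]
      simp only [pvAOuter]
      rw [pvALeft_spec _ _ _ _ hlen hti, pvBSkip_ge S k hk, pvBLoop_past S _ k _ hk]
      simp
  | succ f ih =>
      have hk : k < S.length := by omega
      rw [List.drop_eq_getElem_cons hk]
      simp only [pvAOuter]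
      by_cases hz : PySem.Str.len (S[k]'hk) = 0
      · rw [pvAWhile, dif_neg (by rintro ⟨-, h0⟩; rw [hz] at h0; omega)]
        rw [ih (k + 1) ti out hlen hti (by omega)]
        conv_rhs => rw [pvBSkip]
        rw [dif_pos hk, if_pos hz]
      · have hnn : (0 : Int) ≤ PySem.Str.len (S[k]'hk) := by
          rw [PySem.Str.len_eq]; exact Int.natCast_nonneg _
        have hl := pvAWhile_len tokens (PySem.Str.len (S[k]'hk)) (Int.ofNat k) 0 ti out
        have hle := pvAWhile_le tokens (PySem.Str.len (S[k]'hk)) (Int.ofNat k) 0 ti out hti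
        rw [ih (k + 1) _ _ (by rw [hl, hlen]) hle.2 (by omega)]
        rw [pv_inner tokens S k hk _ rfl ti 0 out hlen hti (by omega)]
        conv_rhs => rw [pvBSkip]
        rw [dif_pos hk, if_neg hz]

-- ===== VERDICT (by name: the statement is the Claim_ definition above) =====
theorem assign_token_to_syllable_py_spec : Claim_equal_assign_token_to_syllable_py := by
  intro tokens syllables _ _
  unfold Spec_assign_token_to_syllable_py assign_token_to_syllable_py assign_token_to_syllable_py_alt
  have h := pv_outer tokens (syllables.map (fun syl => ((PySem.Dict.ofList syl).get? "text").getD ""))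
    0 0 (List.replicate tokens.length (0 : Int)) (by simp) (by omega)
  simpa using h
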